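-- pv_equiv track=rewrite | github.com/ashwin-venkatesan/Coding | CodeChef/AUG20B/CHEFWED.py | arrcost
-- ===== SOURCE A (Python) =====
-- def arrcost(arr):
--     freq = {}
--     sum = 0
--     for i in arr:
--         freq[i] = freq.get(i, 0) + 1
--     for i in freq:
--         if(not freq[i] == 1):
--             sum += freq[i]
--     return sum
-- ===== SOURCE B (Python) =====
-- def arrcost(arr):
--     seen = set()
--     dup = set()
--     for x in arr:
--         if x in seen:
--             dup.add(x)
--         else:
--             seen.add(x)
--     return sum(1 for x in arr if x in dup)
-- ===== Notes on version B (the rewrite author's own statement) =====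
-- stated objective: alternative
-- what changed: replaces the frequency dict and the sum of counts > 1 by a single seen/dup two-set pass, then counts the occurrences of duplicated elements directly in the array
import Mathlib
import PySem

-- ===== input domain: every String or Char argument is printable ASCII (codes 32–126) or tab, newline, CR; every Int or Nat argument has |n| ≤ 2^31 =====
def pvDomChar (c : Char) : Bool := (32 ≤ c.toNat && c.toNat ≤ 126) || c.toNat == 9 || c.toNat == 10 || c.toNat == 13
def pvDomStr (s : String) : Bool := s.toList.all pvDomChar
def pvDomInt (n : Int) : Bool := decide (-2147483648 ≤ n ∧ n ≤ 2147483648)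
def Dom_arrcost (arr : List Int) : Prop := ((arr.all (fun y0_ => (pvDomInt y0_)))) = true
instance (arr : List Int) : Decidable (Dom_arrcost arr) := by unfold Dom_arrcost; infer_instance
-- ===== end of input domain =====

-- B replaces A's frequency dict and sum of counts > 1 by a seen/dup two-set pass that
-- counts occurrences of duplicated elements directly; same O(n) cost, different algorithm.


-- ===== PORT A =====
def arrcost (arr : List Int) : Int :=
  let freq := arr.foldl (fun d i => d.insert i (d.getD i 0 + 1)) (PySem.Dict.empty)
  freq.keys.foldl (fun s i => if !(freq.getD i 0 == 1) then s + freq.getD i 0 else s) 0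

-- ===== PORT B =====
-- the seen/dup loop of Source B, one step per list element
def arrcostGo (xs : List Int) (seen dup : PySem.Set Int) : PySem.Set Int :=
  match xs with
  | [] => dup
  | x :: rest =>
    if PySem.Set.contains seen x then arrcostGo rest seen (PySem.Set.add dup x)
    else arrcostGo rest (PySem.Set.add seen x) dup

def arrcost_alt (arr : List Int) : Int :=
  let dup := arrcostGo arr PySem.Set.empty PySem.Set.empty
  arr.foldl (fun s x => if PySem.Set.contains dup x then s + 1 else s) 0

-- ===== PRECONDITION & SPEC =====
def Spec_arrcost (arr : List Int) (out : Int) : Prop := out = arrcost_alt arr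
instance (arr : List Int) (out : Int) : Decidable (Spec_arrcost arr out) := by unfold Spec_arrcost; infer_instance

-- ===== CLAIM (what is proved, stated in full; the proofs are below) =====
def Claim_equal_arrcost : Prop := ∀ (arr : List Int), Dom_arrcost arr → Spec_arrcost arr (arrcost arr)

-- ===== LEMMAS AND PROOFS =====

-- membership in the dup set produced by Source B's loop
lemma mem_arrcostGo (xs : List Int) : ∀ (seen dup : PySem.Set Int) (x : Int),
    x ∈ arrcostGo xs seen dup ↔ x ∈ dup ∨ (x ∈ seen ∧ x ∈ xs) ∨ 2 ≤ xs.count x := by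
  induction xs with
  | nil => intro seen dup x; simp [arrcostGo]
  | cons y rest ih =>
    intro seen dup x
    by_cases hy : y ∈ seen
    · rw [show arrcostGo (y :: rest) seen dup = arrcostGo rest seen (dup.add y) from by
        simp [arrcostGo, hy], ih]
      by_cases hxy : x = y
      · subst hxy
        simp [PySem.Set.mem_add, hy]
      · simp [PySem.Set.mem_add, hxy, List.count_cons_of_ne (Ne.symm hxy)]
    · rw [show arrcostGo (y :: rest) seen dup = arrcostGo rest (seen.add y) dup from by
        simp [arrcostGo, hy], ih]
      by_cases hxy : x = y
      · subst hxy
        constructor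
        · rintro (hd | ⟨_, hr⟩ | h2)
          · exact Or.inl hd
          · exact Or.inr (Or.inr (by
              rw [List.count_cons_self]
              have := List.count_pos_iff.mpr hr
              omega))
          · exact Or.inr (Or.inr (by rw [List.count_cons_self]; omega))
        · rintro (hd | ⟨hs, _⟩ | h2)
          · exact Or.inl hd
          · exact absurd hs hy
          · rw [List.count_cons_self] at h2
            have hr : x ∈ rest := List.count_pos_iff.mp (by omega)
            exact Or.inr (Or.inl ⟨(PySem.Set.mem_add seen x x).mpr (Or.inr rfl), hr⟩)
      · simp [PySem.Set.mem_add, hxy, List.count_cons_of_ne (Ne.symm hxy)]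

-- split a countP by an auxiliary boolean condition
lemma countP_split (l : List Int) (q r : Int → Bool) :
    l.countP q = l.countP (fun x => q x && r x) + l.countP (fun x => q x && !r x) := by
  induction l with
  | nil => simp
  | cons a l ih =>
    simp only [List.countP_cons, ih]
    cases hq : q a <;> cases hr : r a <;> simp <;> omega

-- the occurrences equal to k that satisfy q count as 'if q k then count of k else 0'
lemma countP_and_beq (l : List Int) (q : Int → Bool) (k : Int) :
    l.countP (fun x => q x && (x == k)) = if q k then l.count k else 0 := by
  induction l with
  | nil => simp
  | cons a l ih =>
    rw [List.countP_cons, List.count_cons, ih]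
    by_cases h : a = k
    · subst h
      simp only [beq_self_eq_true, Bool.and_true, if_true]
      cases hq : q a <;> simp
    · have hb : (a == k) = false := beq_eq_false_iff_ne.mpr h
      simp [hb]

-- weighted sum over a nodup key list covering l = countP over l itself
lemma key_sum (p : Nat → Bool) : ∀ (ks l : List Int), ks.Nodup → (∀ x ∈ l, x ∈ ks) →
    (ks.map (fun k => if p (l.count k) then (l.count k : Int) else 0)).sum
      = (l.countP (fun x => p (l.count x)) : Int) := by
  intro ks
  induction ks with
  | nil =>
    intro l _ hsub
    have hl : l = [] := List.eq_nil_iff_forall_not_mem.mpr (fun x hx => by simpa using hsub x hx)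
    simp [hl]
  | cons k ks ih =>
    intro l hnd hsub
    have hknotin : k ∉ ks := (List.nodup_cons.mp hnd).1
    have hndks : ks.Nodup := (List.nodup_cons.mp hnd).2
    set l' := l.filter (fun x => !(x == k)) with hl'
    have hc : ∀ k' : Int, k' ≠ k → l'.count k' = l.count k' := by
      intro k' hne
      rw [hl']
      exact List.count_filter (by simp [hne])
    have hsub' : ∀ x ∈ l', x ∈ ks := by
      intro x hx
      rw [hl', List.mem_filter] at hx
      have hxk : x ≠ k := by simpa using hx.2
      rcases List.mem_cons.mp (hsub x hx.1) with h | h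
      · exact absurd h hxk
      · exact h
    have hmap : ks.map (fun k' => if p (l.count k') then (l.count k' : Int) else 0)
        = ks.map (fun k' => if p (l'.count k') then (l'.count k' : Int) else 0) := by
      apply List.map_congr_left
      intro k' hk'
      have hne : k' ≠ k := fun h => hknotin (h ▸ hk')
      rw [hc k' hne]
    have hcongr : l'.countP (fun x => p (l'.count x)) = l'.countP (fun x => p (l.count x)) := by
      apply List.countP_congr
      intro x hx
      rw [hl', List.mem_filter] at hx
      have hxk : x ≠ k := by simpa using hx.2
      rw [hc x hxk]
    have hfilter : l'.countP (fun x => p (l.count x))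
        = l.countP (fun x => p (l.count x) && !(x == k)) := by
      rw [hl']
      exact List.countP_filter
    have hsplit := countP_split l (fun x => p (l.count x)) (fun x => x == k)
    have hbeq := countP_and_beq l (fun x => p (l.count x)) k
    simp only [List.map_cons, List.sum_cons, hmap, ih l' hndks hsub', hcongr, hfilter]
    simp only at hsplit hbeq
    by_cases hp : p (l.count k) = true
    · rw [if_pos hp] at hbeq ⊢
      omega
    · rw [if_neg hp] at hbeq ⊢
      omega

-- a conditional accumulating foldl as a sum over a map
lemma foldl_cond_sum (c : Int → Bool) (v : Int → Int) : ∀ (ks : List Int) (s : Int),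
    ks.foldl (fun s i => if c i then s + v i else s) s
      = s + (ks.map (fun i => if c i then v i else 0)).sum := by
  intro ks
  induction ks with
  | nil => intro s; simp
  | cons a ks ih =>
    intro s
    rw [List.foldl_cons, ih]
    cases h : c a <;> simp [h] <;> ring

-- A computes the countP of 'count ≠ 1'
lemma arrcost_eq_countP (arr : List Int) :
    arrcost arr = (arr.countP (fun x => !(arr.count x == 1)) : Int) := by
  show (PySem.Dict.keys (arr.foldl (fun d i => d.insert i (d.getD i 0 + 1)) PySem.Dict.empty)).foldl _ 0 = _
  rw [PySem.Dict.foldl_insert_getD_add_one_eq_counter, PySem.Dict.keys_counter]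
  rw [foldl_cond_sum (fun i => !((PySem.Dict.counter arr).getD i 0 == 1))
    (fun i => (PySem.Dict.counter arr).getD i 0)]
  simp only [PySem.Dict.getD_counter, zero_add]
  have hb : ∀ n : Nat, (((n : Int)) == 1) = (n == 1) := by
    intro n
    by_cases h : n = 1
    · simp [h]
    · have h' : (n : Int) ≠ 1 := by exact_mod_cast h
      simp [h, h']
  have hmap : (PySem.Set.ofList arr).map (fun i => if !((arr.count i : Int) == 1) then (arr.count i : Int) else 0)
      = (PySem.Set.ofList arr).map (fun k => if (fun n : Nat => !(n == 1)) (arr.count k) then (arr.count k : Int) else 0) := by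
    apply List.map_congr_left
    intro k _
    rw [hb]
  rw [hmap]
  simpa using key_sum (fun n : Nat => !(n == 1)) (PySem.Set.ofList arr) arr
    (PySem.Set.nodup_ofList arr) (fun x hx => (PySem.Set.mem_ofList arr x).mpr hx)

-- B computes the countP of 'count ≥ 2'
lemma arrcost_alt_eq_countP (arr : List Int) :
    arrcost_alt arr = (arr.countP (fun x => decide (2 ≤ arr.count x)) : Int) := by
  show arr.foldl (fun s x => if PySem.Set.contains (arrcostGo arr PySem.Set.empty PySem.Set.empty) x then s + 1 else s) 0 = _
  rw [PySem.List.foldl_if_add_one]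
  have hcong : arr.countP (fun x => PySem.Set.contains (arrcostGo arr PySem.Set.empty PySem.Set.empty) x)
      = arr.countP (fun x => decide (2 ≤ arr.count x)) := by
    apply List.countP_congr
    intro x hx
    have hmem := mem_arrcostGo arr PySem.Set.empty PySem.Set.empty x
    by_cases h2 : 2 ≤ arr.count x
    · have hin : x ∈ arrcostGo arr PySem.Set.empty PySem.Set.empty := hmem.mpr (Or.inr (Or.inr h2))
      have hct : PySem.Set.contains (arrcostGo arr PySem.Set.empty PySem.Set.empty) x = true :=
        (PySem.Set.contains_iff _ x).mpr hin
      rw [hct]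
      simp [h2]
    · have hnot : x ∉ arrcostGo arr PySem.Set.empty PySem.Set.empty := by
        intro hmm
        rcases hmem.mp hmm with h | ⟨hs, _⟩ | h
        · simp [PySem.Set.empty] at h
        · simp [PySem.Set.empty] at hs
        · exact h2 h
      have hcf : PySem.Set.contains (arrcostGo arr PySem.Set.empty PySem.Set.empty) x = false := by
        cases hcc : PySem.Set.contains (arrcostGo arr PySem.Set.empty PySem.Set.empty) x
        · rfl
        · exact absurd ((PySem.Set.contains_iff _ x).mp hcc) hnot
      rw [hcf]
      simp [h2]
  rw [hcong]
  simp

-- ===== VERDICT (by name: the statement is the Claim_ definition above) =====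
theorem arrcost_spec : Claim_equal_arrcost := by
  intro arr _
  unfold Spec_arrcost
  rw [arrcost_eq_countP, arrcost_alt_eq_countP]
  congr 1
  apply List.countP_congr
  intro x hx
  have h1 : 0 < arr.count x := List.count_pos_iff.mpr hx
  by_cases h : arr.count x = 1
  · simp [h]
  · simp [h]
    omega
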